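-- pv_equiv track=rewrite | github.com/andrenbrandao/algorithm-problems | recursion-and-dp/possible_phrases.py | phrases
-- ===== SOURCE A (Python) =====
-- def phrases(arr):
--     result = []
--     height = len(arr)
--
--     def helper(arr, currentWords, currentHeight):
--         if currentHeight == height:
--             result.append(" ".join(currentWords))
--             return
--
--         for word in arr[currentHeight]:
--             currentWords.append(word)
--             helper(arr, currentWords, currentHeight + 1)
--             currentWords.pop()
--
--     helper(arr, [], 0)
--     return result
-- ===== SOURCE B (Python) =====
-- def phrases(arr):
--     acc = [[]]
--     for words in arr:
--         acc = [prev + [w] for prev in acc for w in words]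
--     return [" ".join(c) for c in acc]
-- ===== Notes on version B (the rewrite author's own statement) =====
-- stated objective: simpler
-- what changed: Replaced the recursive DFS with append/pop backtracking by an iterative breadth-wise fold that expands the full list of partial combinations once per word list.
import Mathlib
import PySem

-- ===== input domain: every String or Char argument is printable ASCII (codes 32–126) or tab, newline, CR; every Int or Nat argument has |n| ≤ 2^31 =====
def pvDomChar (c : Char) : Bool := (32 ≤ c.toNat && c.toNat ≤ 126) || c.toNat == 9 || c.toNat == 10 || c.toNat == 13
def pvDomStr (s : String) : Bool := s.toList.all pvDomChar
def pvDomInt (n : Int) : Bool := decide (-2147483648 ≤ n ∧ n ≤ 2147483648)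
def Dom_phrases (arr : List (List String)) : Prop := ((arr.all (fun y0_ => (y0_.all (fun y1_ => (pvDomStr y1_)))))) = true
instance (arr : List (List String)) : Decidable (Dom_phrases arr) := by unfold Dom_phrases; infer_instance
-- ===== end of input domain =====

-- B is a simpler iterative fold over the word lists; A's recursion on the index into arr is
-- ported as the equivalent structural recursion on the remaining suffix of arr.
-- Return-value equivalence only; A never observably mutates its argument.

-- ===== PORT A =====
-- helper(arr, currentWords, currentHeight): the suffix `rest` is arr[currentHeight:];
-- rest = [] iff currentHeight == height.  The inner `for word in arr[currentHeight]`
-- with append/recurse/pop is the foldl accumulating the recursive results in order.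
def phrasesHelper (currentWords : List String) : List (List String) → List String
  | [] => [PySem.Str.join " " currentWords]
  | ws :: rest =>
      ws.foldl (fun acc word => acc ++ phrasesHelper (currentWords ++ [word]) rest) []

def phrases (arr : List (List String)) : List String :=
  phrasesHelper [] arr

-- ===== PORT B =====
def phrases_alt (arr : List (List String)) : List String :=
  (arr.foldl (fun acc words => acc.flatMap (fun prev => words.map (fun w => prev ++ [w]))) [[]]).map
    (fun c => PySem.Str.join " " c)

-- ===== PRECONDITION & SPEC =====
def Spec_phrases (arr : List (List String)) (out : List String) : Prop := out = phrases_alt arr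
instance (arr : List (List String)) (out : List String) : Decidable (Spec_phrases arr out) := by unfold Spec_phrases; infer_instance

-- ===== CLAIM (what is proved, stated in full; the proofs are below) =====
def Claim_equal_phrases : Prop := ∀ (arr : List (List String)), Dom_phrases arr → Spec_phrases arr (phrases arr)

-- ===== LEMMAS AND PROOFS =====

-- DFS-style cartesian product of the word lists.
def pvProd : List (List String) → List (List String)
  | [] => [[]]
  | ws :: rest => ws.flatMap (fun w => (pvProd rest).map (fun t => w :: t))

theorem phrasesHelper_eq (rest : List (List String)) :
    ∀ cur, phrasesHelper cur rest = (pvProd rest).map (fun t => PySem.Str.join " " (cur ++ t)) := by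
  induction rest with
  | nil => intro cur; simp [phrasesHelper, pvProd]
  | cons ws rest ih =>
      intro cur
      rw [phrasesHelper, PySem.List.foldl_append_eq_flatMap]
      simp [pvProd, List.map_flatMap, List.map_map, Function.comp_def, ih]

theorem foldl_expand_eq (rest : List (List String)) :
    ∀ acc : List (List String),
      rest.foldl (fun acc words => acc.flatMap (fun prev => words.map (fun w => prev ++ [w]))) acc
        = acc.flatMap (fun p => (pvProd rest).map (fun t => p ++ t)) := by
  induction rest with
  | nil => intro acc; simp [pvProd]
  | cons ws rest ih =>
      intro acc
      rw [List.foldl_cons, ih]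
      simp [pvProd, List.flatMap_assoc, List.flatMap_map, List.map_flatMap, List.map_map, Function.comp_def, List.append_assoc]

-- ===== VERDICT (by name: the statement is the Claim_ definition above) =====
theorem phrases_spec : Claim_equal_phrases := by
  intro arr _
  unfold Spec_phrases phrases phrases_alt
  rw [phrasesHelper_eq, foldl_expand_eq]
  simp
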